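-- pv_equiv track=rewrite | github.com/okanexe/Basic-Java-HTML-JavaScript | gitHubData/kelimeIslem.py | arti
-- ===== SOURCE A (Python) =====
-- def arti(kelime , indeks):
--     d=0
--     d1=0
--     d2=0
--     artiListeEkle=[]
--     artiString=""
--     artiListe=list(kelime)
--     if(artiListe[indeks]=="+"):
--         indeks = indeks+1
--     while(artiListe[indeks]=="*"):
--         indeks = indeks +1
--     if artiListe == "*":
--         return artiListe
--     for j in range(indeks,len(artiListe)):
--         if(artiListe[j]=="+"):
--             d+=1
--             if(d==1):
--                 d1=j
--             if(d==2):
--                 d2=j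
--     if(d==0):
--         for k in artiListe:
--             artiString=artiString + k
--         return artiString
--     if(d==1):
--         del artiListe[d1]
--         for k in artiListe:
--             artiString=artiString + k
--         return artiString
--
--     if(d>=2):
--
--         for g in range(d1+1,d2):
--             artiListeEkle.append(artiListe[g])
--         del artiListe[d1:d2+1]
--         artiListe=artiListe+artiListeEkle
--         for k in artiListe:
--             artiString=artiString + k
--         return artiString
-- ===== SOURCE B (Python) =====
-- def arti(kelime, indeks):
--     # same index advancement as the original (same IndexError behaviour)
--     if kelime[indeks] == "+":
--         indeks = indeks + 1
--     while kelime[indeks] == "*":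
--         indeks = indeks + 1
--     d1 = kelime.find("+", indeks)
--     if d1 == -1:
--         return kelime
--     d2 = kelime.find("+", d1 + 1)
--     if d2 == -1:
--         return kelime[:d1] + kelime[d1 + 1:]
--     return kelime[:d1] + kelime[d2 + 1:] + kelime[d1 + 1:d2]
-- ===== Notes on version B (the rewrite author's own statement) =====
-- stated objective: faster
-- what changed: B replaces A's counting loop over all indices (tracking d/d1/d2), its element-by-element helper-list copy and its char-by-char string rebuilding with two str.find calls and direct slice concatenation (C-level scan and copy instead of Python-level per-character loops); Pre_ excludes inputs where A raises IndexError and negative in-range indeks, where Python's negative-index wraparound makes A scan characters before the start position (outside the natural domain).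
-- outside the precondition, e.g. on arti('a+b', -2): A returns 'ab', B returns 'a+b'; on arti('ab', -1): A returns 'ab', B returns 'ab'
import Mathlib
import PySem

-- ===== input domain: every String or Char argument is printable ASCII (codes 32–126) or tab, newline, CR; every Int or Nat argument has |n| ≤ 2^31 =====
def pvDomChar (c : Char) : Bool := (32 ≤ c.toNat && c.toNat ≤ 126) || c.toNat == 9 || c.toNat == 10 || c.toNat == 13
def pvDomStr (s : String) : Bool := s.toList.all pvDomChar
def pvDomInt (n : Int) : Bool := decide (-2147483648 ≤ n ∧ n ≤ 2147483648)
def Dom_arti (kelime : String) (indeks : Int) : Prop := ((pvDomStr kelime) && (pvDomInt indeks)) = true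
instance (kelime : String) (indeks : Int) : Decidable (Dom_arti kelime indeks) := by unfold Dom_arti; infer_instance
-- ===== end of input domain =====

-- B rewrites the plus-rearrangement with two str.find calls and three slices instead of A's
-- counting fold and char-by-char string rebuilding (objective: faster, measured by the timing
-- run as a constant-factor speedup; the index-advancement skip loop is kept identical).

-- ===== PORT A =====

-- the `while artiListe[indeks] == "*"` loop of both Pythons (identical in A and in B);
-- fuel = len+1 suffices for a nonnegative start; none = IndexError (excluded by Pre_)
def pvSkipStars (s : List Char) : Nat → Int → Option Int
  | 0, _ => none
  | fuel + 1, i =>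
    match PySem.List.pyGet? s i with
    | none => none
    | some c => if c = '*' then pvSkipStars s fuel (i + 1) else some i

-- A's loop body: d+=1; if d==1: d1=j; if d==2: d2=j  (the ' ' default of pyGetD is never
-- used: every j produced by the range is in bounds when the start index is nonnegative)
def pvStep (s : List Char) (st : Int × Int × Int) (j : Int) : Int × Int × Int :=
  if PySem.List.pyGetD s j ' ' = '+' then
    (st.1 + 1, (if st.1 + 1 = 1 then j else st.2.1), (if st.1 + 1 = 2 then j else st.2.2))
  else st

-- literal port of A (the dead `if artiListe == "*"` of the Python compares a list with a
-- string and is always False, so it is omitted; string building `artiString + k` is the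
-- char-append fold over List Char, returned through String.ofList)
def arti (kelime : String) (indeks : Int) : String :=
  let artiListe := kelime.toList
  match PySem.List.pyGet? artiListe indeks with
  | none => ""   -- IndexError on artiListe[indeks]; excluded by Pre_
  | some c0 =>
    let i1 : Int := if c0 = '+' then indeks + 1 else indeks
    match pvSkipStars artiListe (artiListe.length + 1) i1 with
    | none => ""  -- IndexError inside the while loop; excluded by Pre_
    | some i =>
      let st := (PySem.List.pyRange i (artiListe.length : Int) 1).foldl (pvStep artiListe) (0, 0, 0)
      if st.1 = 0 then
        String.ofList (artiListe.foldl (fun a k => a ++ [k]) [])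
      else if st.1 = 1 then
        match PySem.List.pop? artiListe st.2.1 with  -- del artiListe[d1]
        | none => ""
        | some r => String.ofList (r.2.foldl (fun a k => a ++ [k]) [])
      else
        let ekle := (PySem.List.pyRange (st.2.1 + 1) st.2.2 1).foldl
          (fun a g => a ++ [PySem.List.pyGetD artiListe g ' ']) []
        let rest := PySem.List.slice artiListe none (some st.2.1) ++
          PySem.List.slice artiListe (some (st.2.2 + 1)) none   -- del artiListe[d1:d2+1]
        String.ofList ((rest ++ ekle).foldl (fun a k => a ++ [k]) [])

-- ===== PORT B =====

-- literal port of B: same index advancement, then two kelime.find('+', …) calls and slicing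
def arti_alt (kelime : String) (indeks : Int) : String :=
  let s := kelime.toList
  match PySem.List.pyGet? s indeks with
  | none => ""   -- IndexError on kelime[indeks]; excluded by Pre_
  | some c0 =>
    let i1 : Int := if c0 = '+' then indeks + 1 else indeks
    match pvSkipStars s (s.length + 1) i1 with
    | none => ""  -- IndexError inside the while loop; excluded by Pre_
    | some i =>
      let d1 := PySem.Chars.findFrom s ['+'] i none
      if d1 = -1 then kelime
      else
        let d2 := PySem.Chars.findFrom s ['+'] (d1 + 1) none
        if d2 = -1 then
          String.ofList (PySem.List.slice s none (some d1) ++ PySem.List.slice s (some (d1 + 1)) none)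
        else
          String.ofList (PySem.List.slice s none (some d1) ++ PySem.List.slice s (some (d2 + 1)) none
            ++ PySem.List.slice s (some (d1 + 1)) (some d2))

-- ===== PRECONDITION & SPEC =====
-- Pre_ excludes (a) the inputs where A raises IndexError (indeks out of range, or the skip
-- loop running off the end over '*'s) and (b) negative in-range indeks, which is outside the
-- function's natural domain: there Python's negative-index wraparound makes A scan characters
-- before the start position, an accident of the implementation.
def Pre_arti (kelime : String) (indeks : Int) : Prop :=
  0 ≤ indeks ∧ indeks < (kelime.toList.length : Int) ∧
  ((kelime.toList.drop
      (if kelime.toList.getD indeks.toNat ' ' = '+' then indeks.toNat + 1 else indeks.toNat)).any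
    (fun c => c ≠ '*')) = true
instance (kelime : String) (indeks : Int) : Decidable (Pre_arti kelime indeks) := by
  unfold Pre_arti; infer_instance

def pvWitness_arti : String × Int := ("a+b", 0)

def Spec_arti (kelime : String) (indeks : Int) (out : String) : Prop := out = arti_alt kelime indeks
instance (kelime : String) (indeks : Int) (out : String) : Decidable (Spec_arti kelime indeks out) := by unfold Spec_arti; infer_instance

-- ===== CLAIM (what is proved, stated in full; the proofs are below) =====
def Claim_equal_arti : Prop := ∀ (kelime : String) (indeks : Int), Dom_arti kelime indeks → Pre_arti kelime indeks → Spec_arti kelime indeks (arti kelime indeks)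

-- ===== LEMMAS AND PROOFS =====

-- first '+' at or after position i (proof-only characterisation of both programs' search)
def pvFirstPlus (s : List Char) (i : Nat) : Option Nat :=
  if h : i < s.length then
    (if s[i] = '+' then some i else pvFirstPlus s (i + 1))
  else none
termination_by s.length - i

theorem pvFirstPlus_none (s : List Char) (i : Nat) (h : pvFirstPlus s i = none) :
    ∀ m, i ≤ m → s[m]? ≠ some '+' := by
  fun_induction pvFirstPlus s i with
  | case1 i hlt hc => simp at h
  | case2 i hlt hc ih =>
    intro m hm
    rcases Nat.eq_or_lt_of_le hm with rfl | hlt2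
    · simp [List.getElem?_eq_getElem hlt, hc]
    · exact ih h m hlt2
  | case3 i hge =>
    intro m hm
    have : s.length ≤ m := by omega
    simp [List.getElem?_eq_none_iff.mpr this]

theorem pvFirstPlus_some (s : List Char) (i j : Nat) (h : pvFirstPlus s i = some j) :
    i ≤ j ∧ j < s.length ∧ s[j]? = some '+' ∧ ∀ m, i ≤ m → m < j → s[m]? ≠ some '+' := by
  fun_induction pvFirstPlus s i with
  | case1 i hlt hc =>
    simp at h; subst h
    exact ⟨le_refl _, hlt, by simp [List.getElem?_eq_getElem hlt, hc], fun m h1 h2 => by omega⟩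
  | case2 i hlt hc ih =>
    obtain ⟨h1, h2, h3, h4⟩ := ih h
    refine ⟨by omega, h2, h3, ?_⟩
    intro m hm hmj
    rcases Nat.eq_or_lt_of_le hm with rfl | hlt2
    · simp [List.getElem?_eq_getElem hlt, hc]
    · exact h4 m hlt2 hmj
  | case3 i hge => simp at h

theorem pvSingleton_prefix (c : Char) (u : List Char) : [c] <+: u ↔ u.head? = some c := by
  cases u with
  | nil => simp
  | cons a t => simp [List.cons_prefix_cons, eq_comm]

theorem pvFind_none (s : List Char) (i : Nat) (hi : i ≤ s.length)
    (h : pvFirstPlus s i = none) : PySem.Chars.findFrom s ['+'] (i : Int) none = -1 := by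
  rw [PySem.Chars.findFrom_natCast s _ i hi]
  have : PySem.Chars.find (List.drop i s) ['+'] = -1 := by
    rw [PySem.Chars.find_eq_neg_one_iff, List.singleton_infix_iff]
    intro hmem
    obtain ⟨k, hk, hget⟩ := List.mem_iff_getElem.mp hmem
    have : s[i + k]? = some '+' := by
      rw [← List.getElem?_drop]
      simp [List.getElem?_eq_getElem hk, hget]
    exact pvFirstPlus_none s i h (i + k) (by omega) this
  simp [this]

theorem pvFind_some (s : List Char) (i j : Nat) (hi : i ≤ s.length)
    (h : pvFirstPlus s i = some j) : PySem.Chars.findFrom s ['+'] (i : Int) none = (j : Int) := by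
  obtain ⟨hij, hjlt, hj, hmin⟩ := pvFirstPlus_some s i j h
  rw [PySem.Chars.findFrom_natCast s _ i hi]
  have hjdrop : (List.drop i s)[j - i]? = some '+' := by
    rw [List.getElem?_drop]; rwa [Nat.add_sub_cancel' hij]
  have hin : ['+'] <:+: List.drop i s := by
    rw [List.singleton_infix_iff]
    exact List.mem_of_getElem? hjdrop
  have hq0 : 0 ≤ PySem.Chars.find (List.drop i s) ['+'] :=
    (PySem.Chars.find_nonneg_iff _ _).mpr hin
  obtain ⟨hpre, hminq⟩ := PySem.Chars.find_spec hq0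
  set q := PySem.Chars.find (List.drop i s) ['+'] with hqdef
  have hqne : ¬ q = -1 := by omega
  rw [if_neg hqne]
  -- the char at q
  have hqchar : s[i + q.toNat]? = some '+' := by
    have := (pvSingleton_prefix '+' _).mp hpre
    rw [List.head?_drop, List.getElem?_drop] at this
    exact this
  -- minimality of j among fp: j ≤ i + q.toNat
  have h1 : j ≤ i + q.toNat := by
    by_contra hcon
    exact hmin (i + q.toNat) (by omega) (by omega) hqchar
  -- minimality of q: q.toNat ≤ j - i
  have h2 : q.toNat ≤ j - i := by
    by_contra hcon
    have := hminq (j - i) (by omega)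
    apply this
    rw [pvSingleton_prefix, List.head?_drop]
    exact hjdrop
  omega

theorem pvStep_plus (s : List Char) (j : Nat) (hj : j < s.length) (hc : s[j] = '+')
    (st : Int × Int × Int) :
    pvStep s st (j : Int) =
      (st.1 + 1, (if st.1 + 1 = 1 then (j : Int) else st.2.1),
        (if st.1 + 1 = 2 then (j : Int) else st.2.2)) := by
  have : PySem.List.pyGetD s (j : Int) ' ' = '+' := by
    rw [PySem.List.pyGetD_natCast, List.getD_eq_getElem?_getD, List.getElem?_eq_getElem hj, hc]
    rfl
  simp [pvStep, this]

theorem pvStep_nonplus (s : List Char) (j : Nat) (hj : j < s.length) (hc : ¬ s[j] = '+')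
    (st : Int × Int × Int) : pvStep s st (j : Int) = st := by
  have : PySem.List.pyGetD s (j : Int) ' ' = s[j] := by
    rw [PySem.List.pyGetD_natCast, List.getD_eq_getElem?_getD, List.getElem?_eq_getElem hj]
    rfl
  simp [pvStep, this, hc]

theorem pvFold_skip_none (s : List Char) (i : Nat) (hi : i ≤ s.length)
    (h : pvFirstPlus s i = none) (st : Int × Int × Int) :
    (PySem.List.pyRange (i : Int) (s.length : Int) 1).foldl (pvStep s) st = st := by
  fun_induction pvFirstPlus s i with
  | case1 i hlt hc => simp at h
  | case2 i hlt hc ih =>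
    rw [PySem.List.pyRange_one_cons (by exact_mod_cast hlt), List.foldl_cons,
      pvStep_nonplus s i hlt hc]
    have := ih (by omega) h
    push_cast at this ⊢
    exact this
  | case3 i hge =>
    have : (s.length : Int) ≤ (i : Int) := by exact_mod_cast Nat.le_of_not_lt hge
    rw [show PySem.List.pyRange (i : Int) (s.length : Int) 1 = [] by
      simp [PySem.List.pyRange]; omega]
    rfl

theorem pvFold_skip_some (s : List Char) (i j : Nat) (hi : i ≤ s.length)
    (h : pvFirstPlus s i = some j) (st : Int × Int × Int) :
    (PySem.List.pyRange (i : Int) (s.length : Int) 1).foldl (pvStep s) st =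
      (PySem.List.pyRange ((j : Int) + 1) (s.length : Int) 1).foldl (pvStep s) (pvStep s st (j : Int)) := by
  fun_induction pvFirstPlus s i generalizing st with
  | case1 i hlt hc =>
    simp only [Option.some.injEq] at h
    subst h
    rw [PySem.List.pyRange_one_cons (by exact_mod_cast hlt), List.foldl_cons]
  | case2 i hlt hc ih =>
    rw [PySem.List.pyRange_one_cons (by exact_mod_cast hlt), List.foldl_cons,
      pvStep_nonplus s i hlt hc]
    have := ih (by omega) h st
    push_cast at this ⊢
    exact this
  | case3 i hge => simp at h

theorem pvFold_ge2 (s : List Char) (l : List Int) :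
    ∀ st : Int × Int × Int, 2 ≤ st.1 →
      2 ≤ (l.foldl (pvStep s) st).1 ∧ (l.foldl (pvStep s) st).2 = st.2 := by
  induction l with
  | nil => intro st h; exact ⟨h, rfl⟩
  | cons x t ih =>
    intro st h
    rw [List.foldl_cons]
    have hstep : 2 ≤ (pvStep s st x).1 ∧ (pvStep s st x).2 = st.2 := by
      unfold pvStep
      split
      · refine ⟨by simp; omega, ?_⟩
        simp only
        rw [if_neg (by omega), if_neg (by omega)]
      · exact ⟨h, rfl⟩
    obtain ⟨h1, h2⟩ := ih _ hstep.1
    exact ⟨h1, h2.trans hstep.2⟩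


theorem pvMapGetRange (s : List Char) (b : Nat) (hb : b ≤ s.length) :
    ∀ a : Nat, (PySem.List.pyRange (a : Int) (b : Int) 1).map (fun g => PySem.List.pyGetD s g ' ')
      = List.take (b - a) (List.drop a s) := by
  intro a
  induction hk : b - a generalizing a with
  | zero =>
    have : (b : Int) ≤ (a : Int) := by exact_mod_cast Nat.le_of_sub_eq_zero hk
    rw [show PySem.List.pyRange (a : Int) (b : Int) 1 = [] by simp [PySem.List.pyRange]; omega]
    simp
  | succ k ih =>
    have hab : a < b := by omega
    have halen : a < s.length := by omega
    rw [PySem.List.pyRange_one_cons (by exact_mod_cast hab), List.map_cons]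
    have hget : PySem.List.pyGetD s (a : Int) ' ' = s[a] := by
      rw [PySem.List.pyGetD_natCast, List.getD_eq_getElem?_getD, List.getElem?_eq_getElem halen]
      rfl
    rw [hget, List.drop_eq_getElem_cons halen, List.take_succ_cons]
    have := ih (a + 1) (by omega)
    push_cast at this ⊢
    rw [this]

theorem pvSkipStars_bounds (s : List Char) :
    ∀ (f : Nat) (i0 i : Int), 0 ≤ i0 → pvSkipStars s f i0 = some i →
      0 ≤ i ∧ i < (s.length : Int) := by
  intro f
  induction f with
  | zero => intro i0 i h0 h; simp [pvSkipStars] at h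
  | succ f ih =>
    intro i0 i h0 h
    unfold pvSkipStars at h
    cases hg : PySem.List.pyGet? s i0 with
    | none => rw [hg] at h; simp at h
    | some c =>
      rw [hg] at h
      dsimp only at h
      have hlt : i0 < (s.length : Int) := by
        by_contra hcon
        unfold PySem.List.pyGet? PySem.List.pyIdx? at hg
        rw [if_pos h0, if_neg hcon] at hg
        simp at hg
      by_cases hc : c = '*'
      · rw [if_pos hc] at h
        exact ih (i0 + 1) i (by omega) h
      · rw [if_neg hc] at h
        simp only [Option.some.injEq] at h
        subst h
        exact ⟨h0, hlt⟩

-- the main branch-by-branch equality, after the (shared) index advancement returned m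
theorem pvMain (kelime : String) (m : Nat) (hm : m ≤ kelime.toList.length) :
    (let artiListe := kelime.toList
     let st := (PySem.List.pyRange (m : Int) (artiListe.length : Int) 1).foldl (pvStep artiListe) (0, 0, 0)
     if st.1 = 0 then
       String.ofList (artiListe.foldl (fun a k => a ++ [k]) [])
     else if st.1 = 1 then
       match PySem.List.pop? artiListe st.2.1 with
       | none => ""
       | some r => String.ofList (r.2.foldl (fun a k => a ++ [k]) [])
     else
       let ekle := (PySem.List.pyRange (st.2.1 + 1) st.2.2 1).foldl
         (fun a g => a ++ [PySem.List.pyGetD artiListe g ' ']) []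
       let rest := PySem.List.slice artiListe none (some st.2.1) ++
         PySem.List.slice artiListe (some (st.2.2 + 1)) none
       String.ofList ((rest ++ ekle).foldl (fun a k => a ++ [k]) [])) =
    (let s := kelime.toList
     let d1 := PySem.Chars.findFrom s ['+'] (m : Int) none
     if d1 = -1 then kelime
     else
       let d2 := PySem.Chars.findFrom s ['+'] (d1 + 1) none
       if d2 = -1 then
         String.ofList (PySem.List.slice s none (some d1) ++ PySem.List.slice s (some (d1 + 1)) none)
       else
         String.ofList (PySem.List.slice s none (some d1) ++ PySem.List.slice s (some (d2 + 1)) none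
           ++ PySem.List.slice s (some (d1 + 1)) (some d2))) := by
  dsimp only
  cases h1 : pvFirstPlus kelime.toList m with
  | none =>
    rw [pvFold_skip_none kelime.toList m hm h1, pvFind_none kelime.toList m hm h1]
    rw [if_pos rfl, if_pos rfl, PySem.List.foldl_append_singleton]
    simp
  | some j1 =>
    obtain ⟨hmj, hj1lt, hj1get, _⟩ := pvFirstPlus_some _ _ _ h1
    have hj1 : kelime.toList[j1] = '+' := (List.getElem?_eq_some_iff.mp hj1get).2
    have hs1 : pvStep kelime.toList (0, 0, 0) (j1 : Int) = (1, (j1 : Int), 0) := by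
      rw [pvStep_plus _ _ hj1lt hj1]; norm_num
    rw [pvFold_skip_some _ _ _ hm h1, hs1, pvFind_some _ _ _ hm h1]
    rw [show (j1 : Int) + 1 = ((j1 + 1 : Nat) : Int) by push_cast; ring]
    cases h2 : pvFirstPlus kelime.toList (j1 + 1) with
    | none =>
      rw [pvFold_skip_none _ _ (by omega) h2, pvFind_none _ _ (by omega) h2]
      rw [if_neg (by norm_num), if_pos rfl, if_neg (by omega), if_pos rfl]
      rw [PySem.List.pop?_natCast _ j1 hj1lt]
      dsimp only
      rw [PySem.List.foldl_append_singleton, List.eraseIdx_eq_take_drop_succ]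
      rw [PySem.List.slice_to (xs := kelime.toList) (b := (j1 : Int)) (by omega),
        PySem.List.slice_from (xs := kelime.toList) (a := ((j1 + 1 : Nat) : Int)) (by omega)]
      simp
    | some j2 =>
      obtain ⟨hj12, hj2lt, hj2get, _⟩ := pvFirstPlus_some _ _ _ h2
      have hj2 : kelime.toList[j2] = '+' := (List.getElem?_eq_some_iff.mp hj2get).2
      have hs2 : pvStep kelime.toList (1, (j1 : Int), 0) (j2 : Int) = (2, (j1 : Int), (j2 : Int)) := by
        rw [pvStep_plus _ _ hj2lt hj2]; norm_num
      rw [pvFold_skip_some _ _ _ (by omega) h2, hs2, pvFind_some _ _ _ (by omega) h2]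
      obtain ⟨hge2, hpair⟩ := pvFold_ge2 kelime.toList
        (PySem.List.pyRange ((j2 : Int) + 1) (kelime.toList.length : Int) 1)
        (2, (j1 : Int), (j2 : Int)) (by norm_num)
      rw [if_neg (by omega), if_neg (by omega), if_neg (by omega), if_neg (by omega)]
      rw [hpair]
      dsimp only
      rw [PySem.List.foldl_append_singleton_eq_map
        (fun g => PySem.List.pyGetD kelime.toList g ' ')]
      rw [PySem.List.foldl_append_singleton]
      rw [show (j1 : Int) + 1 = ((j1 + 1 : Nat) : Int) by push_cast; ring,
        show (j2 : Int) + 1 = ((j2 + 1 : Nat) : Int) by push_cast; ring]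
      rw [pvMapGetRange kelime.toList j2 (by omega)]
      rw [PySem.List.slice_to (xs := kelime.toList) (b := (j1 : Int)) (by omega),
        PySem.List.slice_from (xs := kelime.toList) (a := ((j2 + 1 : Nat) : Int)) (by omega),
        PySem.List.slice_natCast]
      simp [List.append_assoc]

-- ===== VERDICT (by name: the statement is the Claim_ definition above) =====
theorem arti_spec : Claim_equal_arti := by
  intro kelime indeks _ hpre
  show arti kelime indeks = arti_alt kelime indeks
  unfold arti arti_alt
  cases hg : PySem.List.pyGet? kelime.toList indeks with
  | none => simp [hg]
  | some c0 =>
    simp only [hg]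
    cases hs : pvSkipStars kelime.toList (kelime.toList.length + 1)
        (if c0 = '+' then indeks + 1 else indeks) with
    | none => simp
    | some i =>
      have hi0 : 0 ≤ (if c0 = '+' then indeks + 1 else indeks) := by
        have := hpre.1; split <;> omega
      obtain ⟨h0, hlt⟩ := pvSkipStars_bounds kelime.toList _ _ _ hi0 hs
      have hm : i = ((i.toNat : Nat) : Int) := by omega
      have := pvMain kelime i.toNat (by omega)
      rw [hm]
      simpa using this
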